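-- pv_equiv track=rewrite | github.com/Sebas1412/WordGame | WordGame.py | actualizar_mano
-- ===== SOURCE A (Python) =====
-- def actualizar_mano(mano, palabra):
--     """
--     NO asumir que la mano contiene el mismo número de veces una letra
--     que las que aparece en la palabra. Las letras que están en la palabra
--     y no en la mano deben ser ignoradas. Las letras que aparecen más veces
--     en la palabra que en la mano no deben resultar en un total negativo;
--     debemos eliminar esa letra de la mano o poner su cantidad en 0.
--
--     Actualiza la mano: usa las letras que están en la palabra y retorna
--     la nueva mano, sin esas letras.
--
--     No debe modificar mano, sino que debe retornar un nuevo diccionario.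
--
--     palabra: string
--     mano: diccionario (string -> int)
--     retorna: diccionario (string -> int)
--     """
--     palabra_minuscula = palabra.lower()
--     mano_copia = mano.copy()
--     nueva_mano = {}
--     for clave in mano_copia.keys():
--         if clave not in set(palabra_minuscula):
--             nueva_mano[clave] = mano_copia[clave]
--         elif  clave in list(palabra_minuscula):
--             if mano_copia[clave] > 1:
--                 nueva_mano[clave] = mano_copia[clave] - list(palabra_minuscula).count(clave)
--                 if nueva_mano[clave] == 0:
--                     nueva_mano.pop(clave)
--
--
--
--     return nueva_mano
-- ===== SOURCE B (Python) =====
-- def actualizar_mano(mano, palabra):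
--     nueva_mano = mano.copy()
--     letras = palabra.lower()
--     for letra in dict.fromkeys(letras):
--         if letra in nueva_mano:
--             m = nueva_mano[letra]
--             if m <= 1:
--                 del nueva_mano[letra]
--             else:
--                 resto = m - letras.count(letra)
--                 if resto == 0:
--                     del nueva_mano[letra]
--                 else:
--                     nueva_mano[letra] = resto
--     return nueva_mano
-- ===== Notes on version B (the rewrite author's own statement) =====
-- stated objective: faster
-- what changed: B reverses the traversal: instead of rebuilding a new dict by looping over every key of the hand and rebuilding set(palabra)/list(palabra) with a count scan per key, B copies the hand once, lowercases the word once, and loops only over the word's distinct letters, deleting or decrementing the matching entries in place.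
import Mathlib
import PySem

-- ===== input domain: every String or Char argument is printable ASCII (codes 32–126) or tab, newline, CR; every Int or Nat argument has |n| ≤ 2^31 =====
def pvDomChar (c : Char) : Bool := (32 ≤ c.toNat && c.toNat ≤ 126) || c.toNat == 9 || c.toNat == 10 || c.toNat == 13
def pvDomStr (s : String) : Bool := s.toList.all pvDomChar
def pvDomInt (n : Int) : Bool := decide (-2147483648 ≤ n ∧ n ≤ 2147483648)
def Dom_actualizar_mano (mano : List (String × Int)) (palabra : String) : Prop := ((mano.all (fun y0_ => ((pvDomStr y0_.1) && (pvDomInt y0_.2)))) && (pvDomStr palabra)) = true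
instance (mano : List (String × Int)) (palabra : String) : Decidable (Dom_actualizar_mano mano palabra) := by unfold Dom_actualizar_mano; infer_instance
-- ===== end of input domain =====

-- B rewrites A with the reversed traversal (loop over the word's distinct letters, mutating a copy of
-- the hand) instead of rebuilding a new dict from all of the hand's keys; objective: alternative.

-- ===== PORT A =====
-- 'clave in set(palabra_minuscula)' / 'clave in list(palabra_minuscula)': the elements are the
-- 1-character strings of the word, so a key matches iff it is a single char occurring in the word.
def pvEsLetra (pm : List Char) (clave : String) : Bool :=
  match clave.toList with
  | [c] => pm.contains c
  | _ => false

-- 'list(palabra_minuscula).count(clave)': count of the key (a 1-char string) among the word's chars.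
def pvCuenta (pm : List Char) (clave : String) : Int :=
  match clave.toList with
  | [c] => (pm.count c : Int)
  | _ => 0

def actualizar_mano (mano : List (String × Int)) (palabra : String) : List (String × Int) :=
  let pm := (PySem.Str.lower palabra).toList
  let mano_copia := PySem.Dict.ofList mano
  let nueva_mano :=
    mano_copia.keys.foldl
      (fun (nm : PySem.Dict String Int) clave =>
        if ¬ (pvEsLetra pm clave = true) then
          -- mano_copia[clave]: the key comes from mano_copia.keys, so getD is exact here
          nm.insert clave (mano_copia.getD clave 0)
        else if pvEsLetra pm clave = true then
          if mano_copia.getD clave 0 > 1 then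
            let nm := nm.insert clave (mano_copia.getD clave 0 - pvCuenta pm clave)
            -- 'if nueva_mano[clave] == 0: nueva_mano.pop(clave)' (key present, so pop = erase)
            if nm.getD clave 0 = 0 then nm.erase clave else nm
          else nm
        else nm)
      PySem.Dict.empty
  nueva_mano.items

-- ===== PORT B =====
def actualizar_mano_alt (mano : List (String × Int)) (palabra : String) : List (String × Int) :=
  let letras := (PySem.Str.lower palabra).toList
  let nueva_mano :=
    (PySem.List.dedup letras).foldl   -- 'for letra in dict.fromkeys(letras)'
      (fun (nm : PySem.Dict String Int) letra =>
        let k := String.ofList [letra]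
        if nm.contains k then
          let m := nm.getD k 0
          if m ≤ 1 then nm.erase k
          else
            let resto := m - (letras.count letra : Int)
            if resto = 0 then nm.erase k else nm.insert k resto
        else nm)
      (PySem.Dict.ofList mano)        -- 'nueva_mano = mano.copy()'
  nueva_mano.items

-- ===== PRECONDITION & SPEC =====
def Spec_actualizar_mano (mano : List (String × Int)) (palabra : String) (out : List (String × Int)) : Prop := out = actualizar_mano_alt mano palabra
instance (mano : List (String × Int)) (palabra : String) (out : List (String × Int)) : Decidable (Spec_actualizar_mano mano palabra out) := by unfold Spec_actualizar_mano; infer_instance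

-- ===== CLAIM (what is proved, stated in full; the proofs are below) =====
def Claim_equal_actualizar_mano : Prop := ∀ (mano : List (String × Int)) (palabra : String), Dom_actualizar_mano mano palabra → Spec_actualizar_mano mano palabra (actualizar_mano mano palabra)

-- ===== LEMMAS AND PROOFS =====

-- what both loops do to one entry of the hand, for a processed-letter list ls
def pvTr (pm ls : List Char) (p : String × Int) : Option (String × Int) :=
  match p.1.toList with
  | [c] =>
      if c ∈ ls then
        if p.2 ≤ 1 then none
        else if p.2 - (pm.count c : Int) = 0 then none
        else some (p.1, p.2 - (pm.count c : Int))
      else some p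
  | _ => some p

lemma pvTr_nil (pm : List Char) (p : String × Int) : pvTr pm [] p = some p := by
  unfold pvTr
  cases h : p.1.toList with
  | nil => rfl
  | cons a t => cases t <;> simp

lemma pvTr_bind (pm : List Char) (c : Char) (ls : List Char) (hc : c ∉ ls) (p : String × Int) :
    (pvTr pm [c] p).bind (pvTr pm ls) = pvTr pm (c :: ls) p := by
  unfold pvTr
  cases h : p.1.toList with
  | nil => simp [h]
  | cons a t =>
    cases t with
    | cons b t' => simp [h]
    | nil =>
      by_cases hac : a = c
      · subst hac
        simp only [List.mem_cons, true_or]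
        by_cases h1 : p.2 ≤ 1
        · simp [h1]
        · simp only [h1, if_false]
          by_cases h2 : p.2 - (pm.count a : Int) = 0
          · simp [h2]
          · simp [h2, h, hc]
      · simp [hac, h]

lemma pv_filter_keys_ne {D : PySem.Dict String Int} {k : String}
    (h : D.contains k = false) : D.items.filter (fun p => !(p.1 == k)) = D.items := by
  apply List.filter_eq_self.mpr
  intro p hp
  simp only [PySem.Dict.contains, List.any_eq_false] at h
  simpa using h p hp


lemma pv_filter_eq_filterMap {α : Type} (q : α → Bool) (f : α → Option α) (l : List α)
    (h : ∀ a ∈ l, (if q a then some a else none) = f a) : l.filter q = l.filterMap f := by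
  rw [← List.filterMap_eq_filter]
  exact List.filterMap_congr (fun a ha => by rw [← h a ha]; simp [Option.guard])

lemma pv_map_eq_filterMap {α : Type} (g : α → α) (f : α → Option α) (l : List α)
    (h : ∀ a ∈ l, some (g a) = f a) : l.map g = l.filterMap f := by
  rw [← List.filterMap_eq_map]
  exact List.filterMap_congr (fun a ha => h a ha)

lemma pvTr_single_of_ne (pm : List Char) (c : Char) (p : String × Int)
    (h : p.1 ≠ String.ofList [c]) : pvTr pm [c] p = some p := by
  unfold pvTr
  cases hcl : p.1.toList with
  | nil => simp
  | cons a t =>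
    cases t with
    | cons b t' => simp
    | nil =>
      by_cases hac : a = c
      · exact absurd (String.toList_inj.mp (by rw [hcl, hac]; simp)) h
      · simp [hac]

lemma pvTr_single_self (pm : List Char) (c : Char) (v : Int) :
    pvTr pm [c] (String.ofList [c], v) =
      if v ≤ 1 then none
      else if v - (pm.count c : Int) = 0 then none
      else some (String.ofList [c], v - (pm.count c : Int)) := by
  unfold pvTr
  simp

lemma pvTr_full_of_not (pm : List Char) (k : String) (v : Int)
    (h : ¬ pvEsLetra pm k = true) : pvTr pm pm (k, v) = some (k, v) := by
  unfold pvEsLetra at h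
  unfold pvTr
  cases hcl : k.toList with
  | nil => simp
  | cons a t =>
    cases t with
    | cons b t' => simp
    | nil =>
      rw [hcl] at h
      simp only at h
      have : a ∉ pm := by
        intro hmem
        exact h (by simpa using hmem)
      simp [this]

lemma pvTr_full_of_yes (pm : List Char) (k : String) (v : Int)
    (h : pvEsLetra pm k = true) :
    pvTr pm pm (k, v) =
      if v ≤ 1 then none
      else if v - pvCuenta pm k = 0 then none
      else some (k, v - pvCuenta pm k) := by
  unfold pvEsLetra at h
  unfold pvTr pvCuenta
  cases hcl : k.toList with
  | nil => rw [hcl] at h; simp at h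
  | cons a t =>
    cases t with
    | cons b t' => rw [hcl] at h; simp at h
    | nil =>
      rw [hcl] at h
      have hmem : a ∈ pm := by simpa using h
      simp [hmem]

lemma pvTr_dedup (pm : List Char) (p : String × Int) :
    pvTr pm (PySem.List.dedup pm) p = pvTr pm pm p := by
  unfold pvTr
  cases hcl : p.1.toList with
  | nil => rfl
  | cons a t =>
    cases t with
    | cons b t' => simp
    | nil => simp only [PySem.List.mem_dedup]

-- the A-side loop, over a suffix l of the items, appends exactly the surviving entries
lemma pv_A_loop (d : PySem.Dict String Int) (pm : List Char) :
    ∀ (l : List (String × Int)) (nm : PySem.Dict String Int),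
      (l.map Prod.fst).Nodup →
      (∀ p ∈ l, nm.contains p.1 = false) →
      (∀ p ∈ l, d.getD p.1 0 = p.2) →
      ((l.map Prod.fst).foldl
        (fun (nm : PySem.Dict String Int) clave =>
          if ¬ (pvEsLetra pm clave = true) then
            nm.insert clave (d.getD clave 0)
          else if pvEsLetra pm clave = true then
            if d.getD clave 0 > 1 then
              if (nm.insert clave (d.getD clave 0 - pvCuenta pm clave)).getD clave 0 = 0 then
                (nm.insert clave (d.getD clave 0 - pvCuenta pm clave)).erase clave
              else nm.insert clave (d.getD clave 0 - pvCuenta pm clave)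
            else nm
          else nm) nm).items
      = nm.items ++ l.filterMap (pvTr pm pm) := by
  intro l
  induction l with
  | nil => intro nm _ _ _; simp
  | cons a rest ih =>
    obtain ⟨k, v⟩ := a
    intro nm hnd hfresh hvals
    have hkfresh : nm.contains k = false := hfresh (k, v) (by simp)
    have hkval : d.getD k 0 = v := hvals (k, v) (by simp)
    have hnd' : (k :: rest.map Prod.fst).Nodup := by rw [List.map_cons] at hnd; exact hnd
    have hknotin : k ∉ rest.map Prod.fst := (List.nodup_cons.mp hnd').1
    have hndrest : (rest.map Prod.fst).Nodup := (List.nodup_cons.mp hnd').2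
    simp only [List.map_cons, List.foldl_cons, List.filterMap_cons]
    by_cases hE : pvEsLetra pm k = true
    · rw [if_neg (by simp [hE]), if_pos hE]
      rw [pvTr_full_of_yes pm k v hE, hkval]
      by_cases h1 : v > 1
      · rw [if_pos h1]
        rw [show (nm.insert k (v - pvCuenta pm k)).getD k 0 = v - pvCuenta pm k by
              simp [PySem.Dict.getD_insert_self]]
        by_cases h2 : v - pvCuenta pm k = 0
        · rw [if_pos h2]
          have herase : (nm.insert k (v - pvCuenta pm k)).erase k = nm := by
            apply PySem.Dict.ext
            show List.filter _ _ = _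
            rw [PySem.Dict.items_insert_of_not_contains _ _ hkfresh]
            rw [List.filter_append, pv_filter_keys_ne hkfresh]
            simp
          rw [herase, ih nm hndrest
                (fun p hp => hfresh p (List.mem_cons_of_mem _ hp))
                (fun p hp => hvals p (List.mem_cons_of_mem _ hp))]
          have hle : ¬ v ≤ 1 := by omega
          simp [hle, h2]
        · rw [if_neg h2]
          have hfresh' : ∀ p ∈ rest, (nm.insert k (v - pvCuenta pm k)).contains p.1 = false := by
            intro p hp
            rw [PySem.Dict.contains_insert]
            have hb : (p.1 == k) = false := by
              simp only [beq_eq_false_iff_ne]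
              intro hpk
              exact hknotin (hpk ▸ List.mem_map_of_mem hp)
            rw [hb, hfresh p (List.mem_cons_of_mem _ hp)]
            rfl
          rw [ih _ hndrest hfresh' (fun p hp => hvals p (List.mem_cons_of_mem _ hp))]
          rw [PySem.Dict.items_insert_of_not_contains _ _ hkfresh]
          have hle : ¬ v ≤ 1 := by omega
          simp [hle, h2]
      · rw [if_neg h1]
        rw [ih nm hndrest
              (fun p hp => hfresh p (List.mem_cons_of_mem _ hp))
              (fun p hp => hvals p (List.mem_cons_of_mem _ hp))]
        have hle : v ≤ 1 := by omega
        simp [hle]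
    · have hE' : pvEsLetra pm k = false := by simpa using hE
      rw [if_pos (by simp [hE'])]
      rw [pvTr_full_of_not pm k v hE]
      have hfresh' : ∀ p ∈ rest, (nm.insert k (d.getD k 0)).contains p.1 = false := by
        intro p hp
        rw [PySem.Dict.contains_insert]
        have hb : (p.1 == k) = false := by
          simp only [beq_eq_false_iff_ne]
          intro hpk
          exact hknotin (hpk ▸ List.mem_map_of_mem hp)
        rw [hb, hfresh p (List.mem_cons_of_mem _ hp)]
        rfl
      rw [ih _ hndrest hfresh' (fun p hp => hvals p (List.mem_cons_of_mem _ hp))]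
      rw [PySem.Dict.items_insert_of_not_contains _ _ hkfresh, hkval]
      simp

-- one B-side step rewrites the items by pvTr at that letter and keeps the keys Nodup
lemma pv_B_step (pm : List Char) (letras : List Char) (hpm : letras = pm)
    (D : PySem.Dict String Int) (hD : D.keys.Nodup) (c : Char) :
    (let k := String.ofList [c]
     if D.contains k then
       let m := D.getD k 0
       if m ≤ 1 then D.erase k
       else
         let resto := m - (letras.count c : Int)
         if resto = 0 then D.erase k else D.insert k resto
     else D).items = D.items.filterMap (pvTr pm [c]) := by
  subst hpm
  simp only []
  by_cases hcont : D.contains (String.ofList [c]) = true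
  · have hval : ∀ p ∈ D.items, p.1 = String.ofList [c] → p.2 = D.getD (String.ofList [c]) 0 := by
      intro p hp hpk
      have h1 := PySem.Dict.getD_of_mem_items D (k := p.1) (v := p.2) (by simpa using hp) hD 0
      rw [hpk] at h1
      exact h1.symm
    rw [if_pos hcont]
    by_cases h1 : D.getD (String.ofList [c]) 0 ≤ 1
    · rw [if_pos h1]
      show (D.items.filter _) = _
      apply pv_filter_eq_filterMap
      intro p hp
      by_cases hpk : p.1 = String.ofList [c]
      · have hv := hval p hp hpk
        obtain ⟨p1, p2⟩ := p
        simp only at hpk hv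
        subst hpk
        have hp2 : p2 ≤ 1 := by omega
        simp [pvTr_single_self, hp2]
      · rw [pvTr_single_of_ne letras c p hpk]
        simp [hpk]
    · rw [if_neg h1]
      by_cases h2 : D.getD (String.ofList [c]) 0 - (letras.count c : Int) = 0
      · rw [if_pos h2]
        show (D.items.filter _) = _
        apply pv_filter_eq_filterMap
        intro p hp
        by_cases hpk : p.1 = String.ofList [c]
        · have hv := hval p hp hpk
          obtain ⟨p1, p2⟩ := p
          simp only at hpk hv
          subst hpk
          have hn1 : ¬ p2 ≤ 1 := by omega
          have hn2 : p2 - (letras.count c : Int) = 0 := by omega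
          simp [pvTr_single_self, hn1, hn2]
        · rw [pvTr_single_of_ne letras c p hpk]
          simp [hpk]
      · rw [if_neg h2]
        rw [PySem.Dict.items_insert_of_contains D _ hcont]
        apply pv_map_eq_filterMap
        intro p hp
        by_cases hpk : p.1 = String.ofList [c]
        · have hv := hval p hp hpk
          obtain ⟨p1, p2⟩ := p
          simp only at hpk hv
          subst hpk
          simp [pvTr_single_self, hv]
          omega
        · rw [pvTr_single_of_ne letras c p hpk]
          simp [hpk]
  · rw [if_neg hcont]
    have hfresh : ∀ p ∈ D.items, p.1 ≠ String.ofList [c] := by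
      intro p hp hpk
      apply hcont
      simp only [PySem.Dict.contains, List.any_eq_true]
      exact ⟨p, hp, by simp [hpk]⟩
    rw [List.filterMap_congr (fun p hp => pvTr_single_of_ne letras c p (hfresh p hp)),
        List.filterMap_some]

lemma pv_B_step_nodup (letras : List Char) (D : PySem.Dict String Int) (hD : D.keys.Nodup) (c : Char) :
    (let k := String.ofList [c]
     if D.contains k then
       let m := D.getD k 0
       if m ≤ 1 then D.erase k
       else
         let resto := m - (letras.count c : Int)
         if resto = 0 then D.erase k else D.insert k resto
     else D).keys.Nodup := by
  simp only []
  by_cases hcont : D.contains (String.ofList [c]) = true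
  · rw [if_pos hcont]
    have herase : (D.erase (String.ofList [c])).keys.Nodup := by
      show ((D.items.filter _).map Prod.fst).Nodup
      exact hD.sublist (List.filter_sublist.map Prod.fst)
    by_cases h1 : D.getD (String.ofList [c]) 0 ≤ 1
    · rw [if_pos h1]; exact herase
    · rw [if_neg h1]
      by_cases h2 : D.getD (String.ofList [c]) 0 - (letras.count c : Int) = 0
      · rw [if_pos h2]; exact herase
      · rw [if_neg h2]
        rw [PySem.Dict.keys_insert_of_contains D _ hcont]
        exact hD
  · rw [if_neg hcont]; exact hD

lemma pv_B_loop (pm : List Char) :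
    ∀ (ls : List Char), ls.Nodup → ∀ (D : PySem.Dict String Int), D.keys.Nodup →
      (ls.foldl
        (fun (nm : PySem.Dict String Int) letra =>
          let k := String.ofList [letra]
          if nm.contains k then
            let m := nm.getD k 0
            if m ≤ 1 then nm.erase k
            else
              let resto := m - (pm.count letra : Int)
              if resto = 0 then nm.erase k else nm.insert k resto
          else nm) D).items
      = D.items.filterMap (pvTr pm ls) := by
  intro ls
  induction ls with
  | nil =>
    intro _ D _
    simp only [List.foldl_nil]
    rw [List.filterMap_congr (fun p _ => pvTr_nil pm p), List.filterMap_some]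
  | cons c ls ih =>
    intro hnd D hD
    have hc : c ∉ ls := (List.nodup_cons.mp hnd).1
    simp only [List.foldl_cons]
    rw [ih (List.nodup_cons.mp hnd).2 _ (pv_B_step_nodup pm D hD c),
        pv_B_step pm pm rfl D hD c, List.filterMap_filterMap,
        List.filterMap_congr (fun p _ => pvTr_bind pm c ls hc p)]

-- ===== VERDICT (by name: the statement is the Claim_ definition above) =====
theorem actualizar_mano_spec : Claim_equal_actualizar_mano := by
  intro mano palabra _
  unfold Spec_actualizar_mano actualizar_mano actualizar_mano_alt
  simp only []
  have hnd : (PySem.Dict.ofList mano).keys.Nodup := PySem.Dict.nodup_keys_ofList mano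
  rw [pv_B_loop ((PySem.Str.lower palabra).toList) (PySem.List.dedup ((PySem.Str.lower palabra).toList))
        (PySem.List.nodup_dedup _) (PySem.Dict.ofList mano) hnd]
  rw [List.filterMap_congr (fun p _ => pvTr_dedup ((PySem.Str.lower palabra).toList) p)]
  have h2 : ∀ p ∈ (PySem.Dict.ofList mano).items, (PySem.Dict.empty : PySem.Dict String Int).contains p.1 = false := by
    intro p _
    simp [PySem.Dict.contains_empty]
  have h3 : ∀ p ∈ (PySem.Dict.ofList mano).items, (PySem.Dict.ofList mano).getD p.1 0 = p.2 := by
    intro p hp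
    exact PySem.Dict.getD_of_mem_items _ (by simpa using hp) hnd 0
  have hA := pv_A_loop (PySem.Dict.ofList mano) ((PySem.Str.lower palabra).toList)
      (PySem.Dict.ofList mano).items PySem.Dict.empty hnd h2 h3
  calc ((PySem.Dict.ofList mano).keys.foldl _ PySem.Dict.empty).items
      = (PySem.Dict.empty : PySem.Dict String Int).items
          ++ (PySem.Dict.ofList mano).items.filterMap
              (pvTr ((PySem.Str.lower palabra).toList) ((PySem.Str.lower palabra).toList)) := hA
    _ = (PySem.Dict.ofList mano).items.filterMap
              (pvTr ((PySem.Str.lower palabra).toList) ((PySem.Str.lower palabra).toList)) := by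
          simp [PySem.Dict.empty]
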